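-- pv_equiv track=rewrite | github.com/pmh47/spiral-fitting | grids_to_zarr.py | determine_zarr_shape
-- ===== SOURCE A (Python) =====
-- def determine_zarr_shape(grid_coords, full_volume_shape=None, grid_size=500):
--     if not grid_coords:
--         raise ValueError("No grid coordinates found")
--
--     if full_volume_shape is not None:
--         return full_volume_shape
--     else:
--         max_jy = max(jy for jy, _, _ in grid_coords)
--         max_jx = max(jx for _, jx, _ in grid_coords)
--         max_jz = max(jz for _, _, jz in grid_coords)
--         return ((max_jz) * grid_size, (max_jy) * grid_size, (max_jx) * grid_size)
-- ===== SOURCE B (Python) =====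
-- def determine_zarr_shape(grid_coords, full_volume_shape=None, grid_size=500):
--     if not grid_coords:
--         raise ValueError("No grid coordinates found")
--
--     if full_volume_shape is not None:
--         return full_volume_shape
--     else:
--         my, mx, mz = grid_coords[0]
--         for jy, jx, jz in grid_coords[1:]:
--             if jy > my:
--                 my = jy
--             if jx > mx:
--                 mx = jx
--             if jz > mz:
--                 mz = jz
--         return (mz * grid_size, my * grid_size, mx * grid_size)
-- ===== Notes on version B (the rewrite author's own statement) =====
-- stated objective: alternative
-- what changed: The three separate max(...) generator scans over grid_coords are replaced by one fused pass that keeps three running maxima seeded from the first tuple.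
import Mathlib
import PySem

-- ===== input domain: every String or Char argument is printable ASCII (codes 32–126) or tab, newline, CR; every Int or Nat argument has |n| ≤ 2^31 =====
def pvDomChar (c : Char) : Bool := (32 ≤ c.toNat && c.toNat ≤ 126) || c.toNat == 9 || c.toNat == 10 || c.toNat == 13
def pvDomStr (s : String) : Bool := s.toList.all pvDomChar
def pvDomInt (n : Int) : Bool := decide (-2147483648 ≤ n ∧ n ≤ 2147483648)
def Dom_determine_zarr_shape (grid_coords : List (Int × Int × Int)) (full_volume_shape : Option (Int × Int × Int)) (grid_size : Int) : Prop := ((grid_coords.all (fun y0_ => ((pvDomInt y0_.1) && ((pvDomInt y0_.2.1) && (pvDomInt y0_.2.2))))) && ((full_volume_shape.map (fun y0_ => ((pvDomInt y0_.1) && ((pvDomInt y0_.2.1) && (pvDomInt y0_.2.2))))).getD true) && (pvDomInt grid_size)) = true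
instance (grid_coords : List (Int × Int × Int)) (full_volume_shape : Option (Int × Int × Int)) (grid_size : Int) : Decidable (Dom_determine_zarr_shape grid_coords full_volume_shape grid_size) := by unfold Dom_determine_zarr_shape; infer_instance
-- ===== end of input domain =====

-- B replaces A's three separate max(...) scans by one fused running-maxima pass (alternative decomposition, same cost class).

-- ===== PORT A =====
-- A raises ValueError on empty grid_coords (excluded by Pre_); the `.getD 0` default is never reached under Pre_.
def determine_zarr_shape (grid_coords : List (Int × Int × Int)) (full_volume_shape : Option (Int × Int × Int)) (grid_size : Int) : Int × Int × Int :=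
  match full_volume_shape with
  | some s => s
  | none =>
      let max_jy : Int := (PySem.List.max? (grid_coords.map (fun c => c.1)) (fun y => y)).getD 0
      let max_jx : Int := (PySem.List.max? (grid_coords.map (fun c => c.2.1)) (fun y => y)).getD 0
      let max_jz : Int := (PySem.List.max? (grid_coords.map (fun c => c.2.2)) (fun y => y)).getD 0
      (max_jz * grid_size, max_jy * grid_size, max_jx * grid_size)

-- ===== PORT B =====
-- B also raises on empty grid_coords (same guard); the [] branch is never reached under Pre_.
def determine_zarr_shape_alt (grid_coords : List (Int × Int × Int)) (full_volume_shape : Option (Int × Int × Int)) (grid_size : Int) : Int × Int × Int :=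
  match grid_coords with
  | [] => (0, 0, 0)
  | (my0, mx0, mz0) :: rest =>
      match full_volume_shape with
      | some s => s
      | none =>
          let m := rest.foldl (fun (acc : Int × Int × Int) (c : Int × Int × Int) =>
              (if c.1 > acc.1 then c.1 else acc.1,
               if c.2.1 > acc.2.1 then c.2.1 else acc.2.1,
               if c.2.2 > acc.2.2 then c.2.2 else acc.2.2)) (my0, mx0, mz0)
          (m.2.2 * grid_size, m.1 * grid_size, m.2.1 * grid_size)

-- ===== PRECONDITION & SPEC =====
-- Pre_ excludes only the empty list, on which Python A (and B) raise ValueError.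
def Pre_determine_zarr_shape (grid_coords : List (Int × Int × Int)) (full_volume_shape : Option (Int × Int × Int)) (grid_size : Int) : Prop := grid_coords ≠ []
instance (grid_coords : List (Int × Int × Int)) (full_volume_shape : Option (Int × Int × Int)) (grid_size : Int) : Decidable (Pre_determine_zarr_shape grid_coords full_volume_shape grid_size) := by unfold Pre_determine_zarr_shape; infer_instance
def pvWitness_determine_zarr_shape : (List (Int × Int × Int)) × (Option (Int × Int × Int)) × Int := ([(1, 2, 3), (0, 5, 1)], none, 500)

def Spec_determine_zarr_shape (grid_coords : List (Int × Int × Int)) (full_volume_shape : Option (Int × Int × Int)) (grid_size : Int) (out : Int × Int × Int) : Prop := out = determine_zarr_shape_alt grid_coords full_volume_shape grid_size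
instance (grid_coords : List (Int × Int × Int)) (full_volume_shape : Option (Int × Int × Int)) (grid_size : Int) (out : Int × Int × Int) : Decidable (Spec_determine_zarr_shape grid_coords full_volume_shape grid_size out) := by unfold Spec_determine_zarr_shape; infer_instance

-- ===== CLAIM (what is proved, stated in full; the proofs are below) =====
def Claim_equal_determine_zarr_shape : Prop := ∀ (grid_coords : List (Int × Int × Int)) (full_volume_shape : Option (Int × Int × Int)) (grid_size : Int), Dom_determine_zarr_shape grid_coords full_volume_shape grid_size → Pre_determine_zarr_shape grid_coords full_volume_shape grid_size → Spec_determine_zarr_shape grid_coords full_volume_shape grid_size (determine_zarr_shape grid_coords full_volume_shape grid_size)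

-- ===== LEMMAS AND PROOFS =====

-- B's fused triple fold computes the three component-wise running maxima.
theorem trip_foldl (t : List (Int × Int × Int)) (a b c : Int) :
    t.foldl (fun (acc : Int × Int × Int) (c : Int × Int × Int) =>
        (if c.1 > acc.1 then c.1 else acc.1,
         if c.2.1 > acc.2.1 then c.2.1 else acc.2.1,
         if c.2.2 > acc.2.2 then c.2.2 else acc.2.2)) (a, b, c)
      = ((t.map (fun x => x.1)).foldl max a,
         (t.map (fun x => x.2.1)).foldl max b,
         (t.map (fun x => x.2.2)).foldl max c) := by
  induction t generalizing a b c with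
  | nil => simp
  | cons h t ih =>
      simp only [List.foldl_cons, List.map_cons, ih]
      congr 1 <;> [skip; congr 1] <;> congr 1 <;> omega

theorem determine_zarr_shape_spec : Claim_equal_determine_zarr_shape := by
  intro gc fvs gs _ hpre
  unfold Spec_determine_zarr_shape determine_zarr_shape determine_zarr_shape_alt
  match gc, hpre with
  | (my0, mx0, mz0) :: rest, _ =>
    cases fvs with
    | some s => simp
    | none =>
        simp only [trip_foldl, List.map_cons, PySem.List.max?_id_cons, Option.getD_some]
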